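-- pv_equiv track=rewrite | github.com/ArjunSirole/Learn-and-code | meaningful_names.py | calculate_sum_of_powers
-- ===== SOURCE A (Python) =====
-- def calculate_sum_of_powers(number):
--     sum_of_powers = 0
--     number_digits = 0
--
--     temporary_number = number
--     while temporary_number > 0:
--         number_digits += 1
--         temporary_number //= 10
--
--     temporary_number = number
--     for _ in range(number_digits):
--         digit = temporary_number % 10
--         sum_of_powers += digit ** number_digits
--         temporary_number //= 10
--
--     return sum_of_powers
-- ===== SOURCE B (Python) =====
-- def calculate_sum_of_powers(number):
--     if number <= 0:
--         return 0
--     s = str(number)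
--     n = len(s)
--     return sum(int(ch) ** n for ch in s)
-- ===== Notes on version B (the rewrite author's own statement) =====
-- stated objective: idiomatic
-- what changed: Replaces A's two arithmetic digit-extraction passes (a while loop counting digits with //10, then a for loop taking %10 and //10 again) with a single string traversal: convert the number to its decimal string once and sum int(ch)**len(s) over its characters, with a non-positive guard matching A's zero-iteration loops.
import Mathlib
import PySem

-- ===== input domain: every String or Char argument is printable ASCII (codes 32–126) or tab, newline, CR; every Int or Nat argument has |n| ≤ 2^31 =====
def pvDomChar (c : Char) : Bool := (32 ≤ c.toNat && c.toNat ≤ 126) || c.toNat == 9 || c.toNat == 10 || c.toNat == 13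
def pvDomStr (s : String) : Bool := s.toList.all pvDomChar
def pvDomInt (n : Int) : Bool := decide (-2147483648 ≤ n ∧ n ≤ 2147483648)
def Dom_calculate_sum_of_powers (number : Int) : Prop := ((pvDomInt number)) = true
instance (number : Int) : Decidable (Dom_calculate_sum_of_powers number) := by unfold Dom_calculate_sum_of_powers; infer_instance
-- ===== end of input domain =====

-- B replaces A's two arithmetic digit-extraction passes with a single traversal of str(number); idiomatic, same cost.


-- ===== PORT A =====
-- the 'while temporary_number > 0: number_digits += 1; temporary_number //= 10' loop
def pvCountDigits (t : Int) : Int :=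
  if h : 0 < t then pvCountDigits (PySem.Int.floordiv t 10) + 1 else 0
termination_by t.toNat
decreasing_by
  rw [PySem.Int.floordiv_eq_ediv_of_pos (by omega : (0:Int) < 10)]
  omega

def calculate_sum_of_powers (number : Int) : Int :=
  -- sum_of_powers = 0; number_digits (via the while loop above)
  let number_digits := pvCountDigits number
  -- for _ in range(number_digits): digit = t % 10; sum += digit ** number_digits; t //= 10
  -- (digit ** number_digits: number_digits ≥ 0 always, so the exponent is number_digits.toNat)
  let p := (PySem.List.pyRange 0 number_digits 1).foldl
    (fun (st : Int × Int) _ =>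
      (st.1 + (PySem.Int.mod st.2 10) ^ number_digits.toNat, PySem.Int.floordiv st.2 10))
    (0, number)
  p.1

-- ===== PORT B =====
def calculate_sum_of_powers_alt (number : Int) : Int :=
  if number ≤ 0 then 0
  else
    let s := PySem.Int.toChars number          -- s = str(number)
    let n := s.length                          -- n = len(s)
    -- sum(int(ch) ** n for ch in s); every ch is a decimal digit here, so int(ch) never raises
    (s.map (fun ch => ((PySem.Int.ofChars? [ch]).getD 0) ^ n)).sum

-- ===== PRECONDITION & SPEC =====
def Spec_calculate_sum_of_powers (number : Int) (out : Int) : Prop := out = calculate_sum_of_powers_alt number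
instance (number : Int) (out : Int) : Decidable (Spec_calculate_sum_of_powers number out) := by unfold Spec_calculate_sum_of_powers; infer_instance

-- ===== CLAIM (what is proved, stated in full; the proofs are below) =====
def Claim_equal_calculate_sum_of_powers : Prop := ∀ (number : Int), Dom_calculate_sum_of_powers number → Spec_calculate_sum_of_powers number (calculate_sum_of_powers number)

-- ===== LEMMAS AND PROOFS =====

-- least-significant-first decimal digits of a natural number
def pvLsb (n : Nat) : List Nat :=
  if n = 0 then [] else n % 10 :: pvLsb (n / 10)
termination_by n
decreasing_by omega

-- same, but emitting at least one digit (the shape Nat.toDigitsCore produces, reversed)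
def pvLsb' (n : Nat) : List Nat :=
  if n < 10 then [n] else n % 10 :: pvLsb' (n / 10)
termination_by n
decreasing_by omega

theorem pvLsb'_eq_pvLsb (n : Nat) (h : 0 < n) : pvLsb' n = pvLsb n := by
  induction n using Nat.strong_induction_on with
  | _ n ih =>
    rw [pvLsb', pvLsb]
    by_cases h10 : n < 10
    · simp only [if_pos h10, if_neg (by omega : ¬ n = 0)]
      rw [pvLsb, if_pos (by omega : n / 10 = 0)]
      simp [Nat.mod_eq_of_lt h10]
    · simp only [if_neg h10, if_neg (by omega : ¬ n = 0)]
      rw [ih (n / 10) (by omega) (by omega)]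

theorem pvLsb_mem_lt (n : Nat) : ∀ d ∈ pvLsb n, d < 10 := by
  induction n using Nat.strong_induction_on with
  | _ n ih =>
    intro d hd
    rw [pvLsb] at hd
    by_cases h : n = 0
    · simp [h] at hd
    · simp only [if_neg h, List.mem_cons] at hd
      rcases hd with rfl | hd
      · omega
      · exact ih (n / 10) (by omega) d hd

theorem pvToDigitsCore_eq (f : Nat) : ∀ (n : Nat) (acc : List Char), n < f →
    Nat.toDigitsCore 10 f n acc = ((pvLsb' n).map Nat.digitChar).reverse ++ acc := by
  induction f with
  | zero => intro n acc h; omega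
  | succ f ih =>
    intro n acc h
    rw [Nat.toDigitsCore]
    by_cases h0 : n / 10 = 0
    · simp only [if_pos h0]
      rw [pvLsb', if_pos (by omega : n < 10)]
      simp [Nat.mod_eq_of_lt (by omega : n < 10)]
    · simp only [if_neg h0]
      rw [ih (n / 10) _ (by omega)]
      conv_rhs => rw [pvLsb', if_neg (by omega : ¬ n < 10)]
      simp

theorem pvToChars_pos (m : Nat) (h : 0 < m) :
    PySem.Int.toChars (m : Int) = ((pvLsb m).map Nat.digitChar).reverse := by
  have : PySem.Int.toChars (m : Int) = Nat.toDigits 10 m := by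
    simp [PySem.Int.toChars]
  rw [this, Nat.toDigits, pvToDigitsCore_eq (m+1) m [] (by omega), pvLsb'_eq_pvLsb m h]
  simp

theorem pvDigitVal (d : Nat) (h : d < 10) :
    (PySem.Int.ofChars? [Nat.digitChar d]).getD 0 = (d : Int) := by
  interval_cases d <;> decide

theorem pvCountDigits_natCast (m : Nat) : pvCountDigits (m : Int) = ((pvLsb m).length : Int) := by
  induction m using Nat.strong_induction_on with
  | _ m ih =>
    rw [pvCountDigits, pvLsb]
    by_cases h : m = 0
    · simp [h]
    · simp only [if_neg h]
      rw [dif_pos (by omega : (0:Int) < (m:Int))]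
      rw [PySem.Int.floordiv_eq_ediv_of_pos (by omega : (0:Int) < 10)]
      have : (m : Int) / 10 = ((m / 10 : Nat) : Int) := by omega
      rw [this, ih (m / 10) (by omega)]
      simp only [List.length_cons]
      push_cast
      ring

-- A's second loop over a list of length (pvLsb t).length sums d ^ k over the digits of t
theorem pvLoopA (k : Nat) : ∀ (l : List Int) (t : Nat) (s : Int), l.length = (pvLsb t).length →
    (l.foldl (fun (st : Int × Int) _ =>
        (st.1 + (PySem.Int.mod st.2 10) ^ k, PySem.Int.floordiv st.2 10)) (s, (t : Int))).1
      = s + ((pvLsb t).map (fun d => (d : Int) ^ k)).sum := by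
  intro l
  induction l with
  | nil =>
    intro t s hlen
    have : pvLsb t = [] := List.eq_nil_of_length_eq_zero (by simpa using hlen.symm)
    simp [this]
  | cons x l ih =>
    intro t s hlen
    have ht : t ≠ 0 := by
      intro h0
      rw [pvLsb, if_pos h0] at hlen
      simp at hlen
    rw [pvLsb, if_neg ht] at hlen ⊢
    simp only [List.foldl_cons]
    have h1 : PySem.Int.mod (t : Int) 10 = ((t % 10 : Nat) : Int) := by
      exact_mod_cast PySem.Int.mod_natCast t 10
    have h2 : PySem.Int.floordiv (t : Int) 10 = ((t / 10 : Nat) : Int) := by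
      exact_mod_cast PySem.Int.floordiv_natCast t 10
    rw [h1, h2, ih (t / 10) _ (by simpa using hlen)]
    simp
    ring

theorem pvRange_len (k : Nat) : (PySem.List.pyRange 0 (k : Int) 1).length = k := by
  induction k with
  | zero => decide
  | succ k ih =>
    rw [show ((k+1 : Nat) : Int) = (k : Int) + 1 by push_cast; ring]
    rw [PySem.List.pyRange_one_succ_right (by omega : (0:Int) ≤ (k:Int))]
    simp [ih]

-- ===== VERDICT (by name: the statement is the Claim_ definition above) =====
theorem calculate_sum_of_powers_spec : Claim_equal_calculate_sum_of_powers := by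
  intro number _
  unfold Spec_calculate_sum_of_powers calculate_sum_of_powers calculate_sum_of_powers_alt
  by_cases hneg : number ≤ 0
  · -- both sides are 0
    rw [if_pos hneg]
    rw [pvCountDigits, dif_neg (by omega : ¬ 0 < number)]
    have h0 : PySem.List.pyRange (0:Int) 0 1 = [] := by decide
    simp only [h0, List.foldl_nil]
  · rw [if_neg hneg]
    obtain ⟨m, rfl⟩ : ∃ m : Nat, number = (m : Int) :=
      ⟨number.toNat, (Int.toNat_of_nonneg (by omega)).symm⟩
    have hm : 0 < m := by omega
    have hk : pvCountDigits (m : Int) = ((pvLsb m).length : Int) := pvCountDigits_natCast m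
    simp only [hk]
    rw [pvLoopA ((((pvLsb m).length : Int)).toNat) _ m 0 (by rw [pvRange_len])]
    rw [pvToChars_pos m hm]
    have htn : (((pvLsb m).length : Int)).toNat = (pvLsb m).length := by omega
    rw [htn]
    simp only [List.length_reverse, List.length_map, List.map_reverse, List.sum_reverse,
      List.pure_def, List.bind_eq_flatMap, ← List.map_eq_flatMap, List.map_map, zero_add]
    refine congrArg List.sum (List.map_congr_left fun d hd => ?_).symm
    simp only [Function.comp_apply]
    rw [pvDigitVal d (pvLsb_mem_lt m d hd)]
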